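-- pv_equiv track=rewrite | github.com/SuaveGalleta/tesis-residencia | prog01.py | derivadas
-- ===== SOURCE A (Python) =====
-- def derivadas(dme):
--     derivada = []
--     reversearray = dme[::-1]
--     for line in range(len(reversearray)-1):
--         operacion = reversearray[line]-reversearray[line+1]
--         derivada.append(operacion)
--
--     derivada.append(derivada[0])
--     mi_derivada = derivada[::-1]
--
--
--     return mi_derivada
-- ===== SOURCE B (Python) =====
-- def derivadas(dme):
--     out = [dme[-1] - dme[-2]]
--     prev = dme[0]
--     for x in dme[1:]:
--         out.append(x - prev)
--         prev = x
--     return out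
-- ===== Notes on version B (the rewrite author's own statement) =====
-- stated objective: alternative
-- what changed: B replaces A's reverse/index-loop/append-derivada[0]/reverse-back pipeline by one streaming forward pass with a running previous-element accumulator, with the head element computed directly from the last two inputs, so no list is ever reversed or re-read by index.
-- outside the precondition, e.g. on derivadas([]): A raises IndexError, B raises IndexError; on derivadas([7]): A raises IndexError, B raises IndexError; on derivadas([0]): A raises IndexError, B raises IndexError
import Mathlib
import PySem

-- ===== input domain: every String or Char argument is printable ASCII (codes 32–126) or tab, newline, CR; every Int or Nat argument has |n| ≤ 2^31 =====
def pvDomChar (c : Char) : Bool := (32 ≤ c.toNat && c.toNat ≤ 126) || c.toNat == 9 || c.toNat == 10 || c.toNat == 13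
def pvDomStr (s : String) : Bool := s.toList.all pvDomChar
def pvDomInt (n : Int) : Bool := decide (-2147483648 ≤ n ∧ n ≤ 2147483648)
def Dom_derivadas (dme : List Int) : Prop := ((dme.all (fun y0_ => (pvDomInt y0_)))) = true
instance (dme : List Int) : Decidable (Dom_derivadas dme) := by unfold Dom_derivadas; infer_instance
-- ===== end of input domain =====

-- B is a single streaming pass with a running previous-element accumulator whose head is
-- computed directly from the last two inputs: no reversals, no intermediate diffs list re-read.

-- ===== PORT A =====
def derivadas (dme : List Int) : List Int :=
  let reversearray := (PySem.List.slice? dme none none (-1)).getD []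
  let derivada := (PySem.List.pyRange 0 ((reversearray.length : Int) - 1) 1).foldl
    (fun acc line =>
      acc ++ [PySem.List.pyGetD reversearray line 0 - PySem.List.pyGetD reversearray (line + 1) 0]) []
  let derivada2 := derivada ++ [PySem.List.pyGetD derivada 0 0]
  (PySem.List.slice? derivada2 none none (-1)).getD []

-- ===== PORT B =====
def derivadas_alt (dme : List Int) : List Int :=
  let out0 : List Int := [PySem.List.pyGetD dme (-1) 0 - PySem.List.pyGetD dme (-2) 0]
  (((PySem.List.slice dme (some 1) none).foldl
      (fun (s : Int × List Int) x => (x, s.2 ++ [x - s.1]))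
      (PySem.List.pyGetD dme 0 0, out0))).2

-- ===== PRECONDITION & SPEC =====
-- Pre_ excludes lists of length < 2, on which A raises IndexError (derivada[0] on an empty list); B raises there too (dme[-1]/dme[-2]).
def Pre_derivadas (dme : List Int) : Prop := 2 ≤ dme.length
instance (dme : List Int) : Decidable (Pre_derivadas dme) := by unfold Pre_derivadas; infer_instance
def pvWitness_derivadas : List Int := [3, 1, 4, 1]

def Spec_derivadas (dme : List Int) (out : List Int) : Prop := out = derivadas_alt dme
instance (dme : List Int) (out : List Int) : Decidable (Spec_derivadas dme out) := by unfold Spec_derivadas; infer_instance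

-- ===== CLAIM (what is proved, stated in full; the proofs are below) =====
def Claim_equal_derivadas : Prop := ∀ (dme : List Int), Dom_derivadas dme → Pre_derivadas dme → Spec_derivadas dme (derivadas dme)

-- ===== LEMMAS AND PROOFS =====

-- A's loop over the reversed array r, as the adjacent differences of r.
theorem derivA_map (r : List Int) :
    (PySem.List.pyRange 0 ((r.length : Int) - 1) 1).map
      (fun l => PySem.List.pyGetD r l 0 - PySem.List.pyGetD r (l + 1) 0)
      = List.zipWith (· - ·) r r.tail := by
  apply List.ext_getElem
  · simp [PySem.List.length_pyRange_one]
  · intro k h1 h2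
    have hk : k < r.length - 1 := by
      simp [PySem.List.length_pyRange_one] at h1; omega
    simp only [List.getElem_map, PySem.List.getElem_pyRange_one, List.getElem_zipWith,
      List.getElem_tail]
    have e1 : (0 : Int) + (k : Int) = ((k : Nat) : Int) := by omega
    have e2 : (k : Int) + 1 = (((k+1) : Nat) : Int) := by omega
    rw [e1, e2, PySem.List.pyGetD_natCast, PySem.List.pyGetD_natCast]
    rw [List.getD_eq_getElem _ _ (by omega), List.getD_eq_getElem _ _ (by omega)]

-- B's streaming fold from state (p, acc) appends the running differences of p :: ys.
theorem derivB_fold (ys : List Int) (p : Int) (acc : List Int) :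
    ((ys.foldl (fun (s : Int × List Int) x => (x, s.2 ++ [x - s.1])) (p, acc))).2
      = acc ++ List.zipWith (· - ·) ys (p :: ys) := by
  induction ys generalizing p acc with
  | nil => simp
  | cons y ys ih =>
      simp only [List.foldl_cons, List.zipWith_cons_cons, ih, List.append_assoc,
        List.singleton_append]

-- adjacent differences of the reversed list = reversed forward differences
theorem zip_rev (xs : List Int) :
    List.zipWith (· - ·) xs.reverse xs.reverse.tail
      = (List.zipWith (· - ·) xs.tail xs).reverse := by
  apply List.ext_getElem
  · simp
  · intro k h1 h2
    simp at h1 h2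
    have hk : k < xs.length - 1 := by omega
    simp only [List.getElem_zipWith, List.getElem_tail, List.getElem_reverse,
      List.length_zipWith, List.length_tail]
    congr 2 <;> omega

-- ===== VERDICT (by name: the statement is the Claim_ definition above) =====
theorem derivadas_spec : Claim_equal_derivadas := by
  intro dme _ hpre
  unfold Spec_derivadas
  have hpre' : 2 ≤ dme.length := hpre
  unfold derivadas derivadas_alt
  simp only [PySem.List.slice?_none_none_neg_one, Option.getD_some,
    PySem.List.foldl_append_singleton_eq_map, List.nil_append,
    PySem.List.slice_from_one]
  rw [derivA_map dme.reverse, zip_rev, derivB_fold]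
  set F := List.zipWith (· - ·) dme.tail dme with hFdef
  have hFlen : F.length = dme.length - 1 := by simp [hFdef]
  -- close the canonical forms elementwise
  have hzip : List.zipWith (· - ·) dme.tail (PySem.List.pyGetD dme 0 0 :: dme.tail) = F := by
    obtain ⟨a, rest, rfl⟩ : ∃ a rest, dme = a :: rest := by
      cases dme with
      | nil => simp at hpre'
      | cons a rest => exact ⟨a, rest, rfl⟩
    simp [hFdef, PySem.List.pyGetD_zero_cons]
  rw [hzip]
  obtain hnil | ⟨l, a, hFa⟩ := F.eq_nil_or_concat
  · exfalso; rw [hnil] at hFlen; simp at hFlen; omega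
  · rw [List.concat_eq_append] at hFa
    rw [hFa]
    simp only [List.reverse_append, List.reverse_cons, List.reverse_nil, List.nil_append,
      List.singleton_append, List.reverse_reverse, PySem.List.pyGetD_zero_cons]
    refine congrArg (· :: (l ++ [a])) ?_
    -- a = last forward difference = dme[-1] - dme[-2]
    have hFpos : 0 < F.length := by omega
    have hopt : F[F.length - 1]? = some a := by
      rw [hFa]
      have : (l ++ [a]).length - 1 = l.length := by simp
      rw [this]
      simp
    have hval : F[F.length - 1]?
        = some (dme[dme.length - 1]'(by omega) - dme[dme.length - 2]'(by omega)) := by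
      rw [List.getElem?_eq_getElem (by omega)]
      congr 1
      simp only [hFdef, List.getElem_zipWith, List.length_zipWith, List.length_tail,
        List.getElem_tail]
      congr 2 <;> omega
    rw [hopt] at hval
    rw [Option.some_inj.mp hval,
      PySem.List.pyGetD_neg_ofNat dme 1 0 (by omega) (by omega),
      PySem.List.pyGetD_neg_ofNat dme 2 0 (by omega) (by omega)]
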